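-- pv_equiv track=rewrite | github.com/officialarghadas/CSE422-Artificial-Intelligence-BRACU | 24341220_ArghaDas_CSE422_18_Assignment02_Fall2024.py | fitness_check
-- ===== SOURCE A (Python) =====
-- def fitness_check(string, nc, ns):
--     # Split chromosome into timeslot segments
--     timeslots = [string[i * nc:(i + 1) * nc] for i in range(ns)]
--
--     # Overlap penalty
--     overlap_penalty = sum(max(sum(map(int, timeslot)) - 1, 0) for timeslot in timeslots)
--
--     # Consistency penalty
--     course_counts = [0] * nc
--     for timeslot in timeslots:
--         for i, bit in enumerate(timeslot):
--             course_counts[i] += int(bit)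
--     consistency_penalty = sum(abs(count - 1) for count in course_counts)
--
--     return overlap_penalty + consistency_penalty
-- ===== SOURCE B (Python) =====
-- def fitness_check(string, nc, ns):
--     # One flat pass over the consumed prefix: no timeslot list is built; a running
--     # row sum and an incrementing column counter replace A's per-slice scans.
--     n = min(len(string), ns * nc)
--     if n < 0:
--         n = 0
--     course_counts = [0] * nc
--     overlap = 0
--     row_sum = 0
--     col = 0
--     for ch in string[:n]:
--         bit = int(ch)
--         row_sum += bit
--         course_counts[col] += bit
--         col += 1
--         if col == nc:
--             overlap += max(row_sum - 1, 0)
--             row_sum = 0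
--             col = 0
--     if col != 0:
--         overlap += max(row_sum - 1, 0)
--     return overlap + sum(abs(c - 1) for c in course_counts)
-- ===== Notes on version B (the rewrite author's own statement) =====
-- stated objective: alternative
-- what changed: B drops A's timeslot-slice list and its two passes (per-slice overlap sums plus a nested enumerate loop into course_counts): it makes one flat scan over the consumed prefix, keeping a running row sum and an incrementing column counter, flushing the overlap penalty at each row boundary and once more for a ragged final row.
-- outside the precondition, e.g. on fitness_check('123', -1, -2): A returns 0, B raises IndexError
import Mathlib
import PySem

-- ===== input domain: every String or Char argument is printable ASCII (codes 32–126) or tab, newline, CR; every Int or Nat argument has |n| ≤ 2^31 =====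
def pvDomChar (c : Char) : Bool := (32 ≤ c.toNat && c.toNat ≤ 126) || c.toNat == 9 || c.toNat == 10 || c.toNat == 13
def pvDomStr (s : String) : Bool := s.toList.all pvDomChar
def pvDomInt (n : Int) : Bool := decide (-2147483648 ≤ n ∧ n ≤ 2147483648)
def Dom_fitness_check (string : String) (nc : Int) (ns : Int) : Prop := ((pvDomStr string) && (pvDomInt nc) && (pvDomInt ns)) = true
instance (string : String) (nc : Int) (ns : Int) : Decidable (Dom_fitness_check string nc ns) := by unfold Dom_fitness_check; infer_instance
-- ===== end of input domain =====

-- B replaces A's timeslot-slice list and nested enumerate pass by ONE flat scan of the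
-- consumed prefix with a running row sum and column counter (objective: alternative).

-- shared helper: int(bit) for a single character; Pre_ guarantees a digit, so the
-- getD default is never reached on admitted inputs (Python raises ValueError there)
def pyIntChar (c : Char) : Int := (PySem.Int.ofChars? [c]).getD 0

-- ===== PORT A =====
def fitness_check (string : String) (nc : Int) (ns : Int) : Int :=
  -- timeslots = [string[i*nc:(i+1)*nc] for i in range(ns)]
  let timeslots : List (List Char) :=
    (PySem.List.pyRange 0 ns 1).map
      (fun i => PySem.List.slice string.toList (some (i * nc)) (some ((i + 1) * nc)))
  -- overlap_penalty
  let overlap_penalty : Int :=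
    (timeslots.map (fun t => max ((t.map pyIntChar).sum - 1) 0)).sum
  -- course_counts = [0]*nc; nested loop with enumerate.  List.set/getD are no-ops out of
  -- range where Python raises IndexError (only reachable outside Pre_, nc < 0).
  let course_counts : List Int :=
    timeslots.foldl
      (fun cc t =>
        (PySem.List.enumerate t 0).foldl
          (fun cc2 ib => cc2.set ib.1.toNat (cc2.getD ib.1.toNat 0 + pyIntChar ib.2)) cc)
      (List.replicate nc.toNat 0)
  let consistency_penalty : Int := (course_counts.map (fun c => |c - 1|)).sum
  overlap_penalty + consistency_penalty

-- ===== PORT B =====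
-- loop body of Source B's single for-loop; state = (course_counts, overlap, row_sum, col)
def pvStepB (nc : Int) (st : List Int × Int × Int × Int) (ch : Char) : List Int × Int × Int × Int :=
  match st with
  | (cc, ov, rs, col) =>
    let bit := pyIntChar ch
    let rs' := rs + bit
    let cc' := cc.set col.toNat (cc.getD col.toNat 0 + bit)
    let col' := col + 1
    if col' == nc then (cc', ov + max (rs' - 1) 0, 0, 0) else (cc', ov, rs', col')

def fitness_check_alt (string : String) (nc : Int) (ns : Int) : Int :=
  let n0 : Int := min (string.toList.length : Int) (ns * nc)
  let n : Int := if n0 < 0 then 0 else n0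
  let st :=
    (PySem.List.slice string.toList none (some n)).foldl (pvStepB nc)
      (List.replicate nc.toNat 0, 0, 0, 0)
  let ov : Int := if st.2.2.2 ≠ 0 then st.2.1 + max (st.2.2.1 - 1) 0 else st.2.1
  ov + (st.1.map (fun c => |c - 1|)).sum

-- ===== PRECONDITION & SPEC =====
-- Pre_ excludes only inputs where one of the programs raises: non-digit characters in the
-- consumed prefix (A's int(bit) raises ValueError), nc < 0 shapes where A's negative slice
-- bounds produce a non-empty timeslot with course_counts = [] (A raises), and
-- nc < 0 ∧ ns < 0 with a non-empty string (A returns 0 from empty timeslots, B raises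
-- IndexError).  All nc < 0 shapes on which both programs return are admitted.
def Pre_fitness_check (string : String) (nc : Int) (ns : Int) : Prop :=
  (0 ≤ nc ∧
    (string.toList.take (min string.toList.length (ns * nc).toNat)).all
      (fun c => PySem.Chars.isdigit c) = true) ∨
  (nc < 0 ∧ (0 < ns → string.toList.length ≤ (-nc).toNat) ∧
    (ns < 0 → string.toList.length = 0))
instance (string : String) (nc : Int) (ns : Int) : Decidable (Pre_fitness_check string nc ns) := by
  unfold Pre_fitness_check; infer_instance

def pvWitness_fitness_check : String × Int × Int := ("110", 2, 2)

def Spec_fitness_check (string : String) (nc : Int) (ns : Int) (out : Int) : Prop := out = fitness_check_alt string nc ns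
instance (string : String) (nc : Int) (ns : Int) (out : Int) : Decidable (Spec_fitness_check string nc ns out) := by unfold Spec_fitness_check; infer_instance

-- ===== CLAIM (what is proved, stated in full; the proofs are below) =====
def Claim_equal_fitness_check : Prop := ∀ (string : String) (nc : Int) (ns : Int), Dom_fitness_check string nc ns → Pre_fitness_check string nc ns → Spec_fitness_check string nc ns (fitness_check string nc ns)

-- ===== LEMMAS AND PROOFS =====

-- mediating chunk recursion: process rows of width nc, accumulating counts and overlap
def pvAddRow : List Int → Nat → List Char → List Int
  | cc, _, [] => cc
  | cc, j, c :: r => pvAddRow (cc.set j (cc.getD j 0 + pyIntChar c)) (j + 1) r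

def pvRowPen (row : List Char) : Int := max ((row.map pyIntChar).sum - 1) 0

def pvChunk (nc : Nat) : Nat → List Char → List Int → Int → List Int × Int
  | 0, _, cc, ov => (cc, ov)
  | k + 1, l, cc, ov =>
      pvChunk nc k (l.drop nc) (pvAddRow cc 0 (l.take nc)) (ov + pvRowPen (l.take nc))

def pvChunks (nc k : Nat) (l : List Char) : List (List Char) :=
  (List.range k).map (fun i => (l.drop (i * nc)).take nc)

def pvResult (string : String) (nc : Int) (ns : Int) : Int :=
  let p := pvChunk nc.toNat ns.toNat string.toList (List.replicate nc.toNat 0) 0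
  p.2 + (p.1.map (fun c => |c - 1|)).sum

theorem pvChunk_succ (nc k : Nat) (l : List Char) (cc : List Int) (ov : Int) :
    pvChunk nc (k + 1) l cc ov =
      pvChunk nc k (l.drop nc) (pvAddRow cc 0 (l.take nc)) (ov + pvRowPen (l.take nc)) := rfl

theorem pvChunks_succ (nc k : Nat) (l : List Char) :
    pvChunks nc (k + 1) l = l.take nc :: pvChunks nc k (l.drop nc) := by
  unfold pvChunks
  rw [List.range_succ_eq_map]
  simp only [List.map_cons, List.map_map, Nat.zero_mul, List.drop_zero]
  congr 1
  apply List.map_congr_left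
  intro i _
  simp only [Function.comp]
  rw [List.drop_drop]
  congr 2
  rw [Nat.succ_mul]; ring

theorem pvChunk_spec (nc : Nat) : ∀ (k : Nat) (l : List Char) (cc : List Int) (ov : Int),
    pvChunk nc k l cc ov =
      ((pvChunks nc k l).foldl (fun cc t => pvAddRow cc 0 t) cc,
        ov + ((pvChunks nc k l).map pvRowPen).sum) := by
  intro k
  induction k with
  | zero => intro l cc ov; simp [pvChunk, pvChunks]
  | succ k ih =>
      intro l cc ov
      rw [pvChunks_succ, pvChunk_succ, ih]
      simp only [List.foldl_cons, List.map_cons, List.sum_cons, Prod.mk.injEq]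
      exact ⟨by trivial, by ring⟩

theorem pvChunk_nil (nc : Nat) : ∀ (k : Nat) (cc : List Int) (ov : Int),
    pvChunk nc k [] cc ov = (cc, ov) := by
  intro k
  induction k with
  | zero => intro cc ov; rfl
  | succ k ih =>
      intro cc ov
      rw [pvChunk_succ, List.take_nil, List.drop_nil, ih]
      simp [pvAddRow, pvRowPen]

theorem pvEnumAdd (t : List Char) : ∀ (cc : List Int) (j : Nat),
    (PySem.List.enumerate t (j : Int)).foldl
      (fun cc2 ib => cc2.set ib.1.toNat (cc2.getD ib.1.toNat 0 + pyIntChar ib.2)) cc =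
    pvAddRow cc j t := by
  induction t with
  | nil => intro cc j; simp [PySem.List.enumerate_nil, pvAddRow]
  | cons c r ih =>
      intro cc j
      rw [PySem.List.enumerate_cons]
      simp only [List.foldl_cons, Int.toNat_natCast]
      have h : ((j : Int) + 1) = ((j + 1 : Nat) : Int) := by push_cast; ring
      rw [h, ih]
      rfl

theorem pvEnumAdd0 (t : List Char) (cc : List Int) :
    (PySem.List.enumerate t 0).foldl
      (fun cc2 ib => cc2.set ib.1.toNat (cc2.getD ib.1.toNat 0 + pyIntChar ib.2)) cc =
    pvAddRow cc 0 t := by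
  have := pvEnumAdd t cc 0
  simpa using this

theorem pvSlice_chunk (l : List Char) (nc : Int) (hnc : 0 ≤ nc) (k : Nat) :
    PySem.List.slice l (some ((k : Int) * nc)) (some (((k : Int) + 1) * nc)) =
      (l.drop (k * nc.toNat)).take nc.toNat := by
  have ha : (0 : Int) ≤ (k : Int) * nc := by positivity
  have hb : (0 : Int) ≤ ((k : Int) + 1) * nc := by positivity
  rw [PySem.List.slice_toNat _ ha hb]
  have h1 : ((k * nc.toNat : Nat) : Int) = (k : Int) * nc := by
    push_cast [Int.toNat_of_nonneg hnc]; ring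
  have h2 : ((k * nc.toNat + nc.toNat : Nat) : Int) = ((k : Int) + 1) * nc := by
    push_cast [Int.toNat_of_nonneg hnc]; ring
  have e1 : ((k : Int) * nc).toNat = k * nc.toNat := by omega
  have e2 : (((k : Int) + 1) * nc).toNat = k * nc.toNat + nc.toNat := by omega
  rw [e1, e2]
  congr 1
  omega

theorem pvA_eq (string : String) (nc ns : Int) (hnc : 0 ≤ nc) :
    fitness_check string nc ns = pvResult string nc ns := by
  unfold fitness_check pvResult
  have hrange : PySem.List.pyRange 0 ns 1 = (List.range ns.toNat).map (fun k : Nat => (k : Int)) := by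
    rw [PySem.List.pyRange_one]
    simp
  have hts : (PySem.List.pyRange 0 ns 1).map
      (fun i => PySem.List.slice string.toList (some (i * nc)) (some ((i + 1) * nc))) =
      pvChunks nc.toNat ns.toNat string.toList := by
    rw [hrange, List.map_map]
    unfold pvChunks
    apply List.map_congr_left
    intro k _
    simp only [Function.comp]
    exact pvSlice_chunk string.toList nc hnc k
  rw [hts]
  simp only [pvEnumAdd0]
  rw [pvChunk_spec]
  simp only [zero_add]
  rfl

-- B-side: a partial final row of the flat scan
theorem pvRow_partial (nc : Int) :
    ∀ (row : List Char) (cc : List Int) (ov rs : Int) (col : Nat),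
      col + row.length < nc.toNat →
      row.foldl (pvStepB nc) (cc, ov, rs, (col : Int)) =
        (pvAddRow cc col row, ov, rs + (row.map pyIntChar).sum, ((col + row.length : Nat) : Int)) := by
  intro row
  induction row with
  | nil => intro cc ov rs col _; simp [pvAddRow]
  | cons c r ih =>
      intro cc ov rs col h
      simp only [List.length_cons] at h
      simp only [List.foldl_cons, pvStepB]
      rw [if_neg (by simp only [beq_iff_eq]; omega : ¬ ((((col : Int)) + 1 == nc) = true))]
      rw [show ((col : Int) + 1) = ((col + 1 : Nat) : Int) from by push_cast; ring]
      rw [ih _ _ _ _ (by omega)]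
      simp only [List.map_cons, List.sum_cons, Prod.mk.injEq, Int.toNat_natCast,
        List.length_cons]
      refine ⟨by trivial, by trivial, by ring, ?_⟩
      congr 1
      omega

-- B-side: a full row of width nc ends with the flush branch
theorem pvRow_full (nc : Int) (hnc : 0 ≤ nc) :
    ∀ (row : List Char) (cc : List Int) (ov rs : Int) (col : Nat),
      col < nc.toNat → col + row.length = nc.toNat →
      row.foldl (pvStepB nc) (cc, ov, rs, (col : Int)) =
        (pvAddRow cc col row, ov + max (rs + (row.map pyIntChar).sum - 1) 0, 0, 0) := by
  intro row
  induction row with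
  | nil =>
      intro cc ov rs col h1 h2
      exact absurd h2 (by simp only [List.length_nil]; omega)
  | cons c r ih =>
      intro cc ov rs col h1 h2
      simp only [List.length_cons] at h2
      simp only [List.foldl_cons, pvStepB]
      by_cases hlast : col + 1 = nc.toNat
      · have hr : r = [] := by
          have : r.length = 0 := by omega
          exact List.length_eq_zero_iff.mp this
        subst hr
        rw [if_pos (by simp only [beq_iff_eq]; omega : ((((col : Int)) + 1 == nc) = true))]
        simp only [List.foldl_nil, List.map_cons, List.map_nil, List.sum_cons, List.sum_nil,
          Prod.mk.injEq, Int.toNat_natCast]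
        exact ⟨rfl, by ring_nf, trivial⟩
      · rw [if_neg (by simp only [beq_iff_eq]; omega : ¬ ((((col : Int)) + 1 == nc) = true))]
        rw [show ((col : Int) + 1) = ((col + 1 : Nat) : Int) from by push_cast; ring]
        rw [ih _ _ _ _ (by omega) (by omega)]
        simp only [List.map_cons, List.sum_cons, Prod.mk.injEq, Int.toNat_natCast]
        exact ⟨rfl, by ring_nf, trivial⟩

def pvFinish (st : List Int × Int × Int × Int) : List Int × Int :=
  (st.1, if st.2.2.2 ≠ 0 then st.2.1 + max (st.2.2.1 - 1) 0 else st.2.1)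

theorem pvMain (nc : Int) (hnc : 0 < nc) :
    ∀ (k : Nat) (l : List Char) (cc : List Int) (ov : Int),
      pvFinish ((l.take (min l.length (k * nc.toNat))).foldl (pvStepB nc) (cc, ov, 0, ((0 : Nat) : Int))) =
        pvChunk nc.toNat k l cc ov := by
  intro k
  induction k with
  | zero =>
      intro l cc ov
      simp [pvFinish, pvChunk]
  | succ k ih =>
      intro l cc ov
      have hpos : 0 < nc.toNat := by omega
      by_cases hl : l.length < nc.toNat
      · have hm : min l.length ((k + 1) * nc.toNat) = l.length := by
          have : nc.toNat ≤ (k + 1) * nc.toNat := Nat.le_mul_of_pos_left _ (by omega)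
          omega
        rw [hm, List.take_length]
        by_cases hnil : l = []
        · subst hnil
          rw [List.foldl_nil, pvChunk_nil]
          simp [pvFinish]
        · have hlen : 0 < l.length := List.length_pos_iff.mpr hnil
          rw [pvRow_partial nc l cc ov 0 0 (by omega)]
          rw [pvChunk_succ, List.take_of_length_le (by omega), List.drop_eq_nil_of_le (by omega),
            pvChunk_nil]
          simp only [pvFinish]
          rw [if_pos (by simp only [ne_eq, Nat.zero_add, Nat.cast_eq_zero]; omega)]
          simp [pvRowPen]
      · rw [not_lt] at hl
        have hm : min l.length ((k + 1) * nc.toNat) =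
            nc.toNat + min (l.length - nc.toNat) (k * nc.toNat) := by
          have h1 : (k + 1) * nc.toNat = nc.toNat + k * nc.toNat := by ring
          omega
        rw [hm, List.take_add, List.foldl_append]
        rw [pvRow_full nc hnc.le (l.take nc.toNat) cc ov 0 0 (by omega)
          (by simp only [List.length_take]; omega)]
        have hdl : (l.drop nc.toNat).length = l.length - nc.toNat := by simp
        have hIH := ih (l.drop nc.toNat) (pvAddRow cc 0 (l.take nc.toNat))
          (ov + max (0 + ((l.take nc.toNat).map pyIntChar).sum - 1) 0)
        rw [hdl] at hIH
        rw [show ((0 : Nat) : Int) = (0 : Int) from rfl] at hIH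
        rw [hIH, pvChunk_succ]
        congr 1
        simp [pvRowPen]

theorem pvB_eq (string : String) (nc ns : Int) (hnc : 0 < nc) :
    fitness_check_alt string nc ns = pvResult string nc ns := by
  simp only [fitness_check_alt, pvResult]
  set l := string.toList with hl
  set n0 : Int := min (l.length : Int) (ns * nc) with hn0
  set n : Int := if n0 < 0 then 0 else n0 with hn
  have hnn : 0 ≤ n := by rw [hn]; split <;> omega
  have htn : n.toNat = min l.length (ns.toNat * nc.toNat) := by
    have hcast : ((ns.toNat * nc.toNat : Nat) : Int) = (ns.toNat : Int) * nc := by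
      push_cast [Int.toNat_of_nonneg hnc.le]; ring
    by_cases hns : 0 ≤ ns
    · rw [Int.toNat_of_nonneg hns] at hcast
      have hmul : 0 ≤ ns * nc := mul_nonneg hns hnc.le
      omega
    · rw [not_le] at hns
      have h1 : ns.toNat = 0 := by omega
      have h2 : ns * nc < 0 := mul_neg_of_neg_of_pos hns hnc
      have hz : n = 0 := by rw [hn, hn0]; split <;> omega
      rw [hz, h1]
      simp
  rw [PySem.List.slice_to l hnn, htn]
  have hmain := pvMain nc hnc ns.toNat l (List.replicate nc.toNat 0) 0
  rw [show ((0 : Nat) : Int) = (0 : Int) from rfl] at hmain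
  have h1 : ((l.take (min l.length (ns.toNat * nc.toNat))).foldl (pvStepB nc)
      (List.replicate nc.toNat 0, 0, 0, 0)).1 =
      (pvChunk nc.toNat ns.toNat l (List.replicate nc.toNat 0) 0).1 := by
    rw [← hmain]; rfl
  have h2 : ((pvFinish ((l.take (min l.length (ns.toNat * nc.toNat))).foldl (pvStepB nc)
      (List.replicate nc.toNat 0, 0, 0, 0))).2) =
      (pvChunk nc.toNat ns.toNat l (List.replicate nc.toNat 0) 0).2 := by
    rw [hmain]
  simp only [pvFinish] at h2
  rw [h1, h2]

theorem pvChunk_zero_nc : ∀ (k : Nat) (l : List Char) (cc : List Int) (ov : Int),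
    pvChunk 0 k l cc ov = (cc, ov) := by
  intro k
  induction k with
  | zero => intro l cc ov; rfl
  | succ k ih =>
      intro l cc ov
      rw [pvChunk_succ, ih]
      simp [pvAddRow, pvRowPen]

theorem pvB_zero (string : String) (ns : Int) : fitness_check_alt string 0 ns = 0 := by
  unfold fitness_check_alt
  simp [PySem.List.slice_to]

theorem pvFoldlConst {α β : Type} (f : α → β → α) (h : ∀ a b, f a b = a) :
    ∀ (l : List β) (a : α), List.foldl f a l = a := by
  intro l
  induction l with
  | nil => intro a; rfl
  | cons x xs ih => intro a; rw [List.foldl_cons, h]; exact ih a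

theorem pvA_neg (string : String) (nc ns : Int) (hnc : nc < 0)
    (hlen : 0 < ns → string.toList.length ≤ (-nc).toNat) :
    fitness_check string nc ns = 0 := by
  simp only [fitness_check]
  have hcc0 : List.replicate nc.toNat (0 : Int) = [] := by
    have h : nc.toNat = 0 := by omega
    rw [h]; rfl
  by_cases hns : ns ≤ 0
  · rw [PySem.List.pyRange_one_eq_nil (by omega)]
    simp [hcc0]
  · rw [not_le] at hns
    have hsl : ∀ i ∈ PySem.List.pyRange 0 ns 1,
        PySem.List.slice string.toList (some (i * nc)) (some ((i + 1) * nc)) = ([] : List Char) := by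
      intro i hi
      have hi0 : 0 ≤ i := (PySem.List.mem_pyRange_one.mp hi).1
      apply List.length_eq_zero_iff.mp
      rw [PySem.List.length_slice]
      have hb : (i + 1) * nc < 0 := mul_neg_of_pos_of_neg (by omega) hnc
      have e1 : (((-((i + 1) * nc)).toNat : Nat) : Int) = -((i + 1) * nc) :=
        Int.toNat_of_nonneg (by omega)
      have e2 : 0 ≤ i * (-nc) := mul_nonneg hi0 (by omega)
      have e3 : -((i + 1) * nc) = i * (-nc) + (-nc) := by ring
      have e4 : (((-nc).toNat : Nat) : Int) = -nc := Int.toNat_of_nonneg (by omega)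
      have hk : 0 < (-((i + 1) * nc)).toNat := by omega
      have hbe : (i + 1) * nc = -(((-((i + 1) * nc)).toNat : Nat) : Int) := by omega
      rw [hbe, PySem.List.clampIdx_neg_natCast _ _ hk]
      have hlen' := hlen hns
      omega
    rw [List.map_congr_left hsl]
    rw [List.foldl_map]
    simp only [PySem.List.enumerate_nil, List.foldl_nil]
    rw [pvFoldlConst _ (fun a b => rfl), hcc0]
    simp

theorem pvB_neg (string : String) (nc ns : Int) (hnc : nc < 0)
    (hlen0 : ns < 0 → string.toList.length = 0) :
    fitness_check_alt string nc ns = 0 := by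
  simp only [fitness_check_alt]
  set l := string.toList with hl
  set n0 : Int := min (l.length : Int) (ns * nc) with hn0
  set n : Int := if n0 < 0 then 0 else n0 with hn
  have hcc0 : List.replicate nc.toNat (0 : Int) = [] := by
    have h : nc.toNat = 0 := by omega
    rw [h]; rfl
  have hn0le : n0 ≤ 0 := by
    rcases lt_trichotomy ns 0 with h | h | h
    · have hz : l.length = 0 := hlen0 h
      rw [hn0]
      omega
    · rw [hn0, h]
      simp
    · have : ns * nc < 0 := mul_neg_of_pos_of_neg h hnc
      rw [hn0]
      omega
  have hnz : n = 0 := by rw [hn]; split <;> omega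
  rw [hnz, PySem.List.slice_to l (le_refl (0 : Int))]
  simp [hcc0]

-- ===== VERDICT (by name: the statement is the Claim_ definition above) =====
theorem fitness_check_spec : Claim_equal_fitness_check := by
  intro string nc ns _hdom hpre
  unfold Spec_fitness_check
  rcases hpre with ⟨hnc, -⟩ | ⟨hnc, hlen, hlen0⟩
  case inr => rw [pvA_neg string nc ns hnc hlen, pvB_neg string nc ns hnc hlen0]
  rcases lt_or_eq_of_le hnc with hpos | hzero
  · rw [pvA_eq string nc ns hnc, pvB_eq string nc ns hpos]
  · subst hzero
    rw [pvA_eq string 0 ns le_rfl, pvB_zero]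
    unfold pvResult
    rw [show ((0:Int)).toNat = 0 from rfl, pvChunk_zero_nc]
    simp
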